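-- pv_equiv track=rewrite | github.com/yannickloth/W33-Theory | THEORY_PART_LIV_SAGE_VERIFICATION.py | build_clique_complex
-- ===== SOURCE A (Python) =====
-- def build_clique_complex(adj, max_dim=3):
--     """
--     Build clique complex: simplices are cliques.
--     """
--     n = len(adj)
--     simplices = []
--
--     # 0-simplices (vertices)
--     for i in range(n):
--         simplices.append([i])
--
--     # 1-simplices (edges)
--     for i in range(n):
--         for j in range(i + 1, n):
--             if adj[i][j]:
--                 simplices.append([i, j])
--
--     # 2-simplices (triangles = 3-cliques)
--     from itertools import combinations
--
--     for triple in combinations(range(n), 3):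
--         i, j, k = triple
--         if adj[i][j] and adj[i][k] and adj[j][k]:
--             simplices.append(list(triple))
--
--     # 3-simplices (tetrahedra = 4-cliques)
--     if max_dim >= 3:
--         for quad in combinations(range(n), 4):
--             is_clique = True
--             for i, u in enumerate(quad):
--                 for v in quad[i + 1 :]:
--                     if not adj[u][v]:
--                         is_clique = False
--                         break
--                 if not is_clique:
--                     break
--             if is_clique:
--                 simplices.append(list(quad))
--
--     return simplices
-- ===== SOURCE B (Python) =====
-- def build_clique_complex(adj, max_dim=3):
--     n = len(adj)
--     # forward-neighbor lists: nbr[i] = sorted vertices j > i with adj[i][j] truthy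
--     nbr = [[j for j in range(i + 1, n) if adj[i][j]] for i in range(n)]
--     nbrset = [set(row) for row in nbr]
--     simplices = [[i] for i in range(n)]
--     edges = [[i, j] for i in range(n) for j in nbr[i]]
--     simplices.extend(edges)
--     tris = [e + [k] for e in edges for k in nbr[e[1]] if k in nbrset[e[0]]]
--     simplices.extend(tris)
--     if max_dim >= 3:
--         simplices.extend(t + [l] for t in tris for l in nbr[t[2]]
--                          if l in nbrset[t[0]] and l in nbrset[t[1]])
--     return simplices
-- ===== Notes on version B (the rewrite author's own statement) =====
-- stated objective: alternative
-- what changed: Instead of scanning all C(n,3) triples and C(n,4) quadruples, B precomputes forward-neighbour lists/sets once and builds each triangle by extending an existing edge and each tetrahedron by extending an existing triangle with set-membership tests, so work beyond the edge scan is proportional to the cliques found (measured ~3.7x on dense inputs, but unconfirmed at the largest timing size, so no speed is claimed).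
import Mathlib
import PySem

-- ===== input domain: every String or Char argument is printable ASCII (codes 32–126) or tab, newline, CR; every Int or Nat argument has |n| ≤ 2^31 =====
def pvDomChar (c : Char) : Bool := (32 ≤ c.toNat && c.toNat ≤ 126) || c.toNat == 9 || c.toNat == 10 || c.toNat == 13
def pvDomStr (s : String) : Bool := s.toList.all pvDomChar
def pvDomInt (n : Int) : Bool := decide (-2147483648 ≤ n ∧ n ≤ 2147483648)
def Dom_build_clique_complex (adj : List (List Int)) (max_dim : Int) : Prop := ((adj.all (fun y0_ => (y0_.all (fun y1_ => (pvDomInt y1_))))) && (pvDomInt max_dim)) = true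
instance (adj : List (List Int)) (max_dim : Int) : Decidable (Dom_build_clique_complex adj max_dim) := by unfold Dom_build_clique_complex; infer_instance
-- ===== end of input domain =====

-- B replaces A's scans of all C(n,3)/C(n,4) vertex tuples by extending edges/triangles with
-- precomputed forward-neighbour lists and set lookups; same output (timing: ~3.7x at
-- n=4096, unconfirmed at the largest size, so no speed is claimed).


-- ===== PORT A =====
-- adj[u][v] as a Python truth value (nonzero int); total via pyGetD, exact under Pre_ (all
-- accessed indices in range there).
def pvAdj (adj : List (List Int)) (u v : Int) : Bool :=
  PySem.List.pyGetD (PySem.List.pyGetD adj u []) v 0 != 0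

-- the 'for i,u in enumerate(quad): for v in quad[i+1:]: …break' clique test: u against the
-- suffix after it, short-circuiting exactly like the Python break
def pvCliqueCheck (adj : List (List Int)) : List Int → Bool
  | [] => true
  | u :: rest => rest.all (fun v => pvAdj adj u v) && pvCliqueCheck adj rest

def build_clique_complex (adj : List (List Int)) (max_dim : Int) : List (List Int) :=
  let n : Int := adj.length
  let simplices : List (List Int) := []
  let simplices := (PySem.List.pyRange 0 n 1).foldl (fun acc i => acc ++ [[i]]) simplices
  let simplices := (PySem.List.pyRange 0 n 1).foldl (fun acc i =>
      (PySem.List.pyRange (i+1) n 1).foldl (fun acc j =>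
        if pvAdj adj i j then acc ++ [[i, j]] else acc) acc) simplices
  -- combinations(range(n), 3) in lexicographic order
  let triples : List (Int × Int × Int) := (PySem.List.pyRange 0 n 1).flatMap (fun i =>
      (PySem.List.pyRange (i+1) n 1).flatMap (fun j =>
        (PySem.List.pyRange (j+1) n 1).map (fun k => (i, j, k))))
  let simplices := triples.foldl (fun acc t =>
      if pvAdj adj t.1 t.2.1 && pvAdj adj t.1 t.2.2 && pvAdj adj t.2.1 t.2.2
      then acc ++ [[t.1, t.2.1, t.2.2]] else acc) simplices
  if max_dim ≥ 3 then
    -- combinations(range(n), 4) in lexicographic order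
    let quads : List (List Int) := (PySem.List.pyRange 0 n 1).flatMap (fun i =>
        (PySem.List.pyRange (i+1) n 1).flatMap (fun j =>
          (PySem.List.pyRange (j+1) n 1).flatMap (fun k =>
            (PySem.List.pyRange (k+1) n 1).map (fun l => [i, j, k, l]))))
    quads.foldl (fun acc q => if pvCliqueCheck adj q then acc ++ [q] else acc) simplices
  else simplices

-- ===== PORT B =====
def build_clique_complex_alt (adj : List (List Int)) (max_dim : Int) : List (List Int) :=
  let n : Int := adj.length
  let nbr : List (List Int) := (PySem.List.pyRange 0 n 1).map (fun i =>
      (PySem.List.pyRange (i+1) n 1).filter (fun j => pvAdj adj i j))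
  let nbrset : List (PySem.Set Int) := nbr.map (fun row => PySem.Set.ofList row)
  let simplices : List (List Int) := (PySem.List.pyRange 0 n 1).map (fun i => [i])
  let edges : List (List Int) := (PySem.List.pyRange 0 n 1).flatMap (fun i =>
      (PySem.List.pyGetD nbr i []).map (fun j => [i, j]))
  let simplices := simplices ++ edges
  let tris : List (List Int) := edges.flatMap (fun e =>
      ((PySem.List.pyGetD nbr (PySem.List.pyGetD e 1 0) []).filter (fun k =>
          PySem.Set.contains (PySem.List.pyGetD nbrset (PySem.List.pyGetD e 0 0) PySem.Set.empty) k)).map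
        (fun k => e ++ [k]))
  let simplices := simplices ++ tris
  if max_dim ≥ 3 then
    simplices ++ tris.flatMap (fun t =>
      ((PySem.List.pyGetD nbr (PySem.List.pyGetD t 2 0) []).filter (fun l =>
          PySem.Set.contains (PySem.List.pyGetD nbrset (PySem.List.pyGetD t 0 0) PySem.Set.empty) l &&
          PySem.Set.contains (PySem.List.pyGetD nbrset (PySem.List.pyGetD t 1 0) PySem.Set.empty) l)).map
        (fun l => t ++ [l]))
  else simplices

-- ===== PRECONDITION & SPEC =====
-- Python A indexes adj[i][j] for every pair i < j < len(adj) (unconditionally in the edge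
-- loop), so it raises IndexError exactly when some row i ≤ n-2 is shorter than n; Pre_
-- admits exactly the inputs on which A returns.
def Pre_build_clique_complex (adj : List (List Int)) (max_dim : Int) : Prop :=
  ∀ p ∈ adj.zipIdx, p.2 + 1 < adj.length → adj.length ≤ p.1.length
instance (adj : List (List Int)) (max_dim : Int) : Decidable (Pre_build_clique_complex adj max_dim) := by unfold Pre_build_clique_complex; infer_instance

def pvWitness_build_clique_complex : List (List Int) × Int := ([[0, 1], [5, 0]], 3)

def Spec_build_clique_complex (adj : List (List Int)) (max_dim : Int) (out : List (List Int)) : Prop := out = build_clique_complex_alt adj max_dim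
instance (adj : List (List Int)) (max_dim : Int) (out : List (List Int)) : Decidable (Spec_build_clique_complex adj max_dim out) := by unfold Spec_build_clique_complex; infer_instance

-- ===== CLAIM (what is proved, stated in full; the proofs are below) =====
def Claim_equal_build_clique_complex : Prop := ∀ (adj : List (List Int)) (max_dim : Int), Dom_build_clique_complex adj max_dim → Pre_build_clique_complex adj max_dim → Spec_build_clique_complex adj max_dim (build_clique_complex adj max_dim)

-- ===== LEMMAS AND PROOFS =====

def pvErow (adj : List (List Int)) (n i : Int) : List Int :=
  (PySem.List.pyRange (i+1) n 1).filter (fun j => pvAdj adj i j)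
def pvTrow (adj : List (List Int)) (n i j : Int) : List Int :=
  (pvErow adj n j).filter (fun k => (PySem.Set.ofList (pvErow adj n i)).contains k)
def pvQrow (adj : List (List Int)) (n i j k : Int) : List Int :=
  (pvErow adj n k).filter (fun l => (PySem.Set.ofList (pvErow adj n i)).contains l &&
    (PySem.Set.ofList (pvErow adj n j)).contains l)
def pvV (n : Int) : List (List Int) := (PySem.List.pyRange 0 n 1).map (fun i => [i])
def pvE (adj : List (List Int)) (n : Int) : List (List Int) :=
  (PySem.List.pyRange 0 n 1).flatMap (fun i => (pvErow adj n i).map (fun j => [i, j]))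
def pvT (adj : List (List Int)) (n : Int) : List (List Int) :=
  (PySem.List.pyRange 0 n 1).flatMap (fun i => (pvErow adj n i).flatMap (fun j =>
    (pvTrow adj n i j).map (fun k => [i, j, k])))
def pvQ (adj : List (List Int)) (n : Int) : List (List Int) :=
  (PySem.List.pyRange 0 n 1).flatMap (fun i => (pvErow adj n i).flatMap (fun j =>
    (pvTrow adj n i j).flatMap (fun k => (pvQrow adj n i j k).map (fun l => [i, j, k, l]))))

theorem pvB_eq (adj : List (List Int)) (max_dim : Int) :
    build_clique_complex_alt adj max_dim =
      ((pvV (adj.length) ++ pvE adj (adj.length)) ++ pvT adj (adj.length)) ++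
        (if max_dim ≥ 3 then pvQ adj (adj.length) else []) := by
  have hrow : ∀ i : Int, 0 ≤ i → i < (adj.length : Int) →
      PySem.List.pyGetD ((PySem.List.pyRange 0 (adj.length : Int) 1).map (fun i =>
        (PySem.List.pyRange (i+1) (adj.length : Int) 1).filter (fun j => pvAdj adj i j))) i [] =
        pvErow adj (adj.length) i :=
    fun i h0 h1 => PySem.List.pyGetD_map_pyRange_of_nonneg _ _ _ _ h0 h1
  have hset : ∀ i : Int, 0 ≤ i → i < (adj.length : Int) →
      PySem.List.pyGetD (((PySem.List.pyRange 0 (adj.length : Int) 1).map (fun i =>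
        (PySem.List.pyRange (i+1) (adj.length : Int) 1).filter (fun j => pvAdj adj i j))).map
          (fun row => PySem.Set.ofList row)) i PySem.Set.empty =
        PySem.Set.ofList (pvErow adj (adj.length) i) := by
    intro i h0 h1
    rw [List.map_map]
    exact PySem.List.pyGetD_map_pyRange_of_nonneg _ _ _ _ h0 h1
  have hE : (PySem.List.pyRange 0 (adj.length : Int) 1).flatMap (fun i =>
      (PySem.List.pyGetD ((PySem.List.pyRange 0 (adj.length : Int) 1).map (fun i =>
        (PySem.List.pyRange (i+1) (adj.length : Int) 1).filter (fun j => pvAdj adj i j))) i []).map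
        (fun j => [i, j])) = pvE adj (adj.length) := by
    refine List.flatMap_congr (fun i hi => ?_)
    obtain ⟨h0, h1⟩ := (PySem.List.mem_pyRange_one).1 hi
    rw [hrow i h0 h1]
  have hT : (pvE adj (adj.length)).flatMap (fun e =>
      ((PySem.List.pyGetD ((PySem.List.pyRange 0 (adj.length : Int) 1).map (fun i =>
          (PySem.List.pyRange (i+1) (adj.length : Int) 1).filter (fun j => pvAdj adj i j)))
          (PySem.List.pyGetD e 1 0) []).filter (fun k =>
        PySem.Set.contains (PySem.List.pyGetD (((PySem.List.pyRange 0 (adj.length : Int) 1).map (fun i =>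
          (PySem.List.pyRange (i+1) (adj.length : Int) 1).filter (fun j => pvAdj adj i j))).map
            (fun row => PySem.Set.ofList row)) (PySem.List.pyGetD e 0 0) PySem.Set.empty) k)).map
        (fun k => e ++ [k])) = pvT adj (adj.length) := by
    rw [pvE, List.flatMap_assoc]
    refine List.flatMap_congr (fun i hi => ?_)
    obtain ⟨h0, h1⟩ := (PySem.List.mem_pyRange_one).1 hi
    rw [List.flatMap_map]
    refine List.flatMap_congr (fun j hj => ?_)
    rw [pvErow, List.mem_filter, PySem.List.mem_pyRange_one] at hj
    have g1 : PySem.List.pyGetD [i, j] 1 0 = j := by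
      simp [PySem.List.pyGetD, PySem.List.pyGet?, PySem.List.pyIdx?]
    have g0 : PySem.List.pyGetD [i, j] 0 0 = i := by
      simp [PySem.List.pyGetD, PySem.List.pyGet?, PySem.List.pyIdx?]
    rw [g1, g0, hrow j (by omega) (by omega), hset i h0 h1]
    rfl
  have hQ : (pvT adj (adj.length)).flatMap (fun t =>
      ((PySem.List.pyGetD ((PySem.List.pyRange 0 (adj.length : Int) 1).map (fun i =>
          (PySem.List.pyRange (i+1) (adj.length : Int) 1).filter (fun j => pvAdj adj i j)))
          (PySem.List.pyGetD t 2 0) []).filter (fun l =>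
        PySem.Set.contains (PySem.List.pyGetD (((PySem.List.pyRange 0 (adj.length : Int) 1).map (fun i =>
          (PySem.List.pyRange (i+1) (adj.length : Int) 1).filter (fun j => pvAdj adj i j))).map
            (fun row => PySem.Set.ofList row)) (PySem.List.pyGetD t 0 0) PySem.Set.empty) l &&
        PySem.Set.contains (PySem.List.pyGetD (((PySem.List.pyRange 0 (adj.length : Int) 1).map (fun i =>
          (PySem.List.pyRange (i+1) (adj.length : Int) 1).filter (fun j => pvAdj adj i j))).map
            (fun row => PySem.Set.ofList row)) (PySem.List.pyGetD t 1 0) PySem.Set.empty) l)).map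
        (fun l => t ++ [l])) = pvQ adj (adj.length) := by
    rw [pvT, List.flatMap_assoc]
    refine List.flatMap_congr (fun i hi => ?_)
    obtain ⟨h0, h1⟩ := (PySem.List.mem_pyRange_one).1 hi
    rw [List.flatMap_assoc]
    refine List.flatMap_congr (fun j hj => ?_)
    rw [pvErow, List.mem_filter, PySem.List.mem_pyRange_one] at hj
    rw [List.flatMap_map]
    refine List.flatMap_congr (fun k hk => ?_)
    rw [pvTrow, List.mem_filter, pvErow, List.mem_filter, PySem.List.mem_pyRange_one] at hk
    have g2 : PySem.List.pyGetD [i, j, k] 2 0 = k := by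
      simp [PySem.List.pyGetD, PySem.List.pyGet?, PySem.List.pyIdx?]
    have g1 : PySem.List.pyGetD [i, j, k] 1 0 = j := by
      simp [PySem.List.pyGetD, PySem.List.pyGet?, PySem.List.pyIdx?]
    have g0 : PySem.List.pyGetD [i, j, k] 0 0 = i := by
      simp [PySem.List.pyGetD, PySem.List.pyGet?, PySem.List.pyIdx?]
    rw [g2, g1, g0, hrow k (by omega) (by omega), hset i h0 h1, hset j (by omega) (by omega)]
    rfl
  simp only [build_clique_complex_alt]
  rw [hE, hT, hQ]
  by_cases hmd : max_dim ≥ 3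
  · simp [hmd, pvV]
  · simp [hmd, pvV]

theorem pvA_eq (adj : List (List Int)) (max_dim : Int) :
    build_clique_complex adj max_dim =
      ((pvV (adj.length) ++
        (PySem.List.pyRange 0 (adj.length : Int) 1).flatMap (fun i =>
          ((PySem.List.pyRange (i+1) (adj.length : Int) 1).filter (fun j => pvAdj adj i j)).map
            (fun j => [i, j]))) ++
        (((PySem.List.pyRange 0 (adj.length : Int) 1).flatMap (fun i =>
          (PySem.List.pyRange (i+1) (adj.length : Int) 1).flatMap (fun j =>
            (PySem.List.pyRange (j+1) (adj.length : Int) 1).map (fun k => (i, j, k))))).filter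
          (fun t => pvAdj adj t.1 t.2.1 && pvAdj adj t.1 t.2.2 && pvAdj adj t.2.1 t.2.2)).map
          (fun t => [t.1, t.2.1, t.2.2])) ++
      (if max_dim ≥ 3 then
        ((PySem.List.pyRange 0 (adj.length : Int) 1).flatMap (fun i =>
          (PySem.List.pyRange (i+1) (adj.length : Int) 1).flatMap (fun j =>
            (PySem.List.pyRange (j+1) (adj.length : Int) 1).flatMap (fun k =>
              (PySem.List.pyRange (k+1) (adj.length : Int) 1).map (fun l => [i, j, k, l]))))).filter
          (pvCliqueCheck adj)
       else []) := by
  simp only [build_clique_complex]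
  simp only [PySem.List.foldl_append_if, PySem.List.foldl_append_singleton_eq_map,
    PySem.List.foldl_append_eq_flatMap]
  by_cases hmd : max_dim ≥ 3
  · simp [hmd, pvV]
  · simp [hmd, pvV]

theorem pv_flatMap_filter {α β : Type} (l : List α) (p : α → Bool) (g : α → List β) :
    (l.filter p).flatMap g = l.flatMap (fun x => if p x then g x else []) := by
  induction l with
  | nil => rfl
  | cons x xs ih =>
    by_cases h : p x = true
    · simp [h, ih]
    · simp [h, ih]

theorem pv_contains (adj : List (List Int)) (n i k : Int) (h1 : i + 1 ≤ k) (h2 : k < n) :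
    (PySem.Set.ofList (pvErow adj n i)).contains k = pvAdj adj i k := by
  simp [pvErow, PySem.List.mem_pyRange_one]
  omega

theorem pvT_eq (adj : List (List Int)) (n : Int) :
    (((PySem.List.pyRange 0 n 1).flatMap (fun i =>
      (PySem.List.pyRange (i+1) n 1).flatMap (fun j =>
        (PySem.List.pyRange (j+1) n 1).map (fun k => (i, j, k))))).filter
      (fun t => pvAdj adj t.1 t.2.1 && pvAdj adj t.1 t.2.2 && pvAdj adj t.2.1 t.2.2)).map
      (fun t => [t.1, t.2.1, t.2.2]) = pvT adj n := by
  simp only [List.filter_flatMap, List.map_flatMap, List.filter_map, List.map_map]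
  rw [pvT]
  refine List.flatMap_congr (fun i hi => ?_)
  obtain ⟨h0, h1⟩ := (PySem.List.mem_pyRange_one).1 hi
  rw [pvErow, pv_flatMap_filter]
  refine List.flatMap_congr (fun j hj => ?_)
  obtain ⟨hj0, hj1⟩ := (PySem.List.mem_pyRange_one).1 hj
  by_cases hij : pvAdj adj i j
  · rw [if_pos hij, pvTrow, pvErow, pvErow, List.filter_filter]
    rw [List.filter_congr (q := fun k => pvAdj adj i k && pvAdj adj j k) ?_]
    · rw [List.filter_congr (p := fun k => (PySem.Set.ofList ((PySem.List.pyRange (i+1) n 1).filter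
          (fun j => pvAdj adj i j))).contains k && pvAdj adj j k)
          (q := fun k => pvAdj adj i k && pvAdj adj j k) ?_]
      · simp
      · intro k hk
        obtain ⟨hk0, hk1⟩ := (PySem.List.mem_pyRange_one).1 hk
        have hc : (PySem.Set.ofList (List.filter (fun j => pvAdj adj i j)
            (PySem.List.pyRange (i + 1) n 1))).contains k = pvAdj adj i k :=
          pv_contains adj n i k (by omega) (by omega)
        beta_reduce
        rw [hc]
    · intro k hk
      simp [hij]
  · rw [if_neg hij]
    rw [List.filter_eq_nil_iff.2 (fun k _ => by simp [hij]), List.map_nil]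

theorem pvQ_eq (adj : List (List Int)) (n : Int) :
    ((PySem.List.pyRange 0 n 1).flatMap (fun i =>
      (PySem.List.pyRange (i+1) n 1).flatMap (fun j =>
        (PySem.List.pyRange (j+1) n 1).flatMap (fun k =>
          (PySem.List.pyRange (k+1) n 1).map (fun l => [i, j, k, l]))))).filter
      (pvCliqueCheck adj) = pvQ adj n := by
  simp only [List.filter_flatMap, List.filter_map]
  rw [pvQ]
  refine List.flatMap_congr (fun i hi => ?_)
  obtain ⟨h0, h1⟩ := (PySem.List.mem_pyRange_one).1 hi
  rw [pvErow, pv_flatMap_filter]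
  refine List.flatMap_congr (fun j hj => ?_)
  obtain ⟨hj0, hj1⟩ := (PySem.List.mem_pyRange_one).1 hj
  by_cases hij : pvAdj adj i j
  · rw [if_pos hij, pvTrow,
      show pvErow adj n j = List.filter (fun k => pvAdj adj j k) (PySem.List.pyRange (j+1) n 1) from rfl,
      List.filter_filter, pv_flatMap_filter]
    refine List.flatMap_congr (fun k hk => ?_)
    obtain ⟨hk0, hk1⟩ := (PySem.List.mem_pyRange_one).1 hk
    have hci : (PySem.Set.ofList (pvErow adj n i)).contains k = pvAdj adj i k :=
      pv_contains adj n i k (by omega) (by omega)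
    by_cases hik : pvAdj adj i k
    · by_cases hjk : pvAdj adj j k
      · rw [if_pos (by rw [hci]; simp [hik, hjk])]
        rw [pvQrow,
          show pvErow adj n k = List.filter (fun l => pvAdj adj k l) (PySem.List.pyRange (k+1) n 1) from rfl,
          List.filter_filter]
        refine congrArg (List.map _) ?_
        have e1 : List.filter ((pvCliqueCheck adj) ∘ fun l => [i, j, k, l])
            (PySem.List.pyRange (k+1) n 1) =
            List.filter (fun l => (pvAdj adj i l && pvAdj adj j l) && pvAdj adj k l)
              (PySem.List.pyRange (k+1) n 1) :=
          List.filter_congr (fun l hl => by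
            simp only [Function.comp_apply, pvCliqueCheck, List.all_cons, List.all_nil, hij, hik, hjk]
            cases pvAdj adj i l <;> cases pvAdj adj j l <;> cases pvAdj adj k l <;> simp)
        have e2 : List.filter (fun l => ((PySem.Set.ofList (pvErow adj n i)).contains l &&
              (PySem.Set.ofList (pvErow adj n j)).contains l) && pvAdj adj k l)
            (PySem.List.pyRange (k+1) n 1) =
            List.filter (fun l => (pvAdj adj i l && pvAdj adj j l) && pvAdj adj k l)
              (PySem.List.pyRange (k+1) n 1) :=
          List.filter_congr (fun l hl => by
            obtain ⟨hl0, hl1⟩ := (PySem.List.mem_pyRange_one).1 hl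
            rw [pv_contains adj n i l (by omega) (by omega),
              pv_contains adj n j l (by omega) (by omega)])
        rw [e1, e2]
      · rw [if_neg (by rw [hci]; simp [hjk])]
        rw [List.filter_eq_nil_iff.2 (fun l _ => by
          simp [pvCliqueCheck, hjk]), List.map_nil]
    · rw [if_neg (by rw [hci]; simp [hik])]
      rw [List.filter_eq_nil_iff.2 (fun l _ => by
        simp [pvCliqueCheck, hik]), List.map_nil]
  · rw [if_neg hij]
    refine List.flatMap_eq_nil_iff.2 (fun k hk => ?_)
    rw [List.filter_eq_nil_iff.2 (fun l _ => by
      simp [pvCliqueCheck, hij]), List.map_nil]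

theorem pv_main (adj : List (List Int)) (max_dim : Int) :
    build_clique_complex adj max_dim = build_clique_complex_alt adj max_dim := by
  rw [pvA_eq, pvB_eq, pvT_eq, pvQ_eq]
  simp only [pvE, pvErow]

-- ===== VERDICT (by name: the statement is the Claim_ definition above) =====
theorem build_clique_complex_spec : Claim_equal_build_clique_complex := by
  intro adj max_dim _ _
  unfold Spec_build_clique_complex
  exact pv_main adj max_dim
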